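-- pv_equiv track=rewrite | github.com/dariomx/topcoder-srm | leetcode/trd-pass/hard/best-meeting-point/best-meeting-point.py | calcFreq
-- ===== SOURCE A (Python) =====
-- from typing import List, Tuple
--
-- def calcFreq(grid: List[List[int]]) -> Tuple[List[int], List[int]]:
--     n, m = len(grid), len(grid[0])
--     fv, fh = [0] * n, [0] * m
--     l1norm = 0
--     for i in range(n):
--         for j in range(m):
--             if grid[i][j] == 1:
--                 fv[i] += 1
--                 fh[j] += 1
--                 l1norm += i + j
--     return fv, fh, l1norm
-- ===== SOURCE B (Python) =====
-- def calcFreq(grid):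
--     m = len(grid[0])
--     fv = [row[:m].count(1) for row in grid]
--     fh = [[row[j] for row in grid].count(1) for j in range(m)]
--     l1norm = sum(i * c for i, c in enumerate(fv)) + sum(j * c for j, c in enumerate(fh))
--     return fv, fh, l1norm
-- ===== Notes on version B (the rewrite author's own statement) =====
-- stated objective: simpler
-- what changed: Replaces the fused nested loop with in-place counter mutation by two marginal passes (per-row count of 1s in row[:m] and per-column count via column lists) and derives l1norm afterwards from the identity l1norm = sum(i*fv[i]) + sum(j*fh[j]).
import Mathlib
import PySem

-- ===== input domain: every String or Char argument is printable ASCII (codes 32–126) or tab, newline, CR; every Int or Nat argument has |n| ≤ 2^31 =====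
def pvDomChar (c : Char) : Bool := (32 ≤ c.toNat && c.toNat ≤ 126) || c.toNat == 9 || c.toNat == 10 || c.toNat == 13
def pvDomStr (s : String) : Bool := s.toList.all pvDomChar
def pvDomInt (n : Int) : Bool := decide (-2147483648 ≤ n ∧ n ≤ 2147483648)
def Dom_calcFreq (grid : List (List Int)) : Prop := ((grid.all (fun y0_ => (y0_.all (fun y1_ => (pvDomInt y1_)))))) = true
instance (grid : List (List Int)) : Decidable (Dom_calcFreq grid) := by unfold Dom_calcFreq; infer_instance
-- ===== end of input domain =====

-- B computes the two marginal count vectors by comprehensions and derives l1norm from them afterwards, instead of A's fused nested loop mutating counters in place.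

-- ===== PORT A =====
-- Literal port of A's nested index loops; loop indices come from pyRange and are nonnegative, so pySetD/pyGetD render fv[i] += 1 / fh[j] += 1 / grid[i][j] exactly inside Pre_.
def calcFreq (grid : List (List Int)) : List Int × List Int × Int :=
  let n : Int := (grid.length : Int)
  let m : Int := ((PySem.List.pyGetD grid 0 []).length : Int)
  let fv0 : List Int := PySem.List.pyRepeat [(0 : Int)] n
  let fh0 : List Int := PySem.List.pyRepeat [(0 : Int)] m
  (PySem.List.pyRange 0 n 1).foldl (fun st i =>
    (PySem.List.pyRange 0 m 1).foldl (fun (st : List Int × List Int × Int) j =>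
      if PySem.List.pyGetD (PySem.List.pyGetD grid i []) j 0 = 1 then
        (PySem.List.pySetD st.1 i (PySem.List.pyGetD st.1 i 0 + 1),
         PySem.List.pySetD st.2.1 j (PySem.List.pyGetD st.2.1 j 0 + 1),
         st.2.2 + i + j)
      else st) st)
    (fv0, fh0, 0)

-- ===== PORT B =====
def calcFreq_alt (grid : List (List Int)) : List Int × List Int × Int :=
  let m : Int := ((PySem.List.pyGetD grid 0 []).length : Int)
  let fv : List Int := grid.map (fun row => (PySem.List.count (PySem.List.slice row none (some m)) 1 : Int))
  let fh : List Int := (PySem.List.pyRange 0 m 1).map (fun j =>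
    (PySem.List.count (grid.map (fun row => PySem.List.pyGetD row j 0)) 1 : Int))
  let l1norm : Int := ((PySem.List.enumerate fv 0).map (fun p => p.1 * p.2)).sum
                    + ((PySem.List.enumerate fh 0).map (fun p => p.1 * p.2)).sum
  (fv, fh, l1norm)

-- ===== PRECONDITION & SPEC =====
-- Pre_ excludes exactly the inputs where A raises IndexError: the empty grid (len(grid[0]))
-- and grids with some row shorter than row 0 (grid[i][j]); B raises on those inputs too.
def Pre_calcFreq (grid : List (List Int)) : Prop :=
  grid ≠ [] ∧ ∀ row ∈ grid, (grid.headD []).length ≤ row.length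
instance (grid : List (List Int)) : Decidable (Pre_calcFreq grid) := by unfold Pre_calcFreq; infer_instance

def pvWitness_calcFreq : List (List Int) := [[1, 0], [0, 1]]

def Spec_calcFreq (grid : List (List Int)) (out : List Int × List Int × Int) : Prop := out = calcFreq_alt grid
instance (grid : List (List Int)) (out : List Int × List Int × Int) : Decidable (Spec_calcFreq grid out) := by unfold Spec_calcFreq; infer_instance

-- ===== CLAIM (what is proved, stated in full; the proofs are below) =====
def Claim_equal_calcFreq : Prop := ∀ (grid : List (List Int)), Dom_calcFreq grid → Pre_calcFreq grid → Spec_calcFreq grid (calcFreq grid)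

-- ===== LEMMAS AND PROOFS =====

-- number of 1s among the first m entries of r (out-of-range entries read as 0)
def cntN (r : List Int) : Nat → Int
  | 0 => 0
  | m + 1 => cntN r m + (if r.getD m 0 = 1 then 1 else 0)

-- sum of the column indices j < m with r[j] = 1
def sIdxN (r : List Int) : Nat → Int
  | 0 => 0
  | m + 1 => sIdxN r m + (if r.getD m 0 = 1 then (m : Int) else 0)

-- effect of A's inner loop on fh for one row r
def bumpN (r fh : List Int) : Nat → List Int
  | 0 => fh
  | m + 1 =>
    if r.getD m 0 = 1 then
      PySem.List.pySetD (bumpN r fh m) (m : Int) (PySem.List.pyGetD (bumpN r fh m) (m : Int) 0 + 1)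
    else bumpN r fh m

def fvA (grid : List (List Int)) (m k : Nat) : List Int :=
  (List.range k).map (fun i => cntN (grid.getD i []) m)

def fhK (grid : List (List Int)) (fh : List Int) (m : Nat) : Nat → List Int
  | 0 => fh
  | k + 1 => bumpN (grid.getD k []) (fhK grid fh m k) m

def colCntK (grid : List (List Int)) (j : Nat) : Nat → Int
  | 0 => 0
  | k + 1 => colCntK grid j k + (if (grid.getD k []).getD j 0 = 1 then 1 else 0)

def rowSIdx (grid : List (List Int)) (m : Nat) : Nat → Int
  | 0 => 0
  | k + 1 => rowSIdx grid m k + sIdxN (grid.getD k []) m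

def rowCntW (grid : List (List Int)) (m : Nat) : Nat → Int
  | 0 => 0
  | k + 1 => rowCntW grid m k + cntN (grid.getD k []) m * (k : Int)

def l1A (grid : List (List Int)) (m : Nat) : Nat → Int
  | 0 => 0
  | k + 1 => l1A grid m k + cntN (grid.getD k []) m * (k : Int) + sIdxN (grid.getD k []) m

def colWeight (grid : List (List Int)) (k : Nat) : Nat → Int
  | 0 => 0
  | m + 1 => colWeight grid k m + (m : Int) * colCntK grid m k

def wSum (xs : List Int) : Nat → Int
  | 0 => 0
  | k + 1 => wSum xs k + (k : Int) * xs.getD k 0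

theorem getD_set_self' (l : List Int) (i : Nat) (a d : Int) (h : i < l.length) :
    (l.set i a).getD i d = a := by
  rw [List.getD_eq_getElem _ _ (by simpa using h)]
  exact List.getElem_set_self _

theorem getD_set_ne' (l : List Int) (i j : Nat) (a d : Int) (h : i ≠ j) :
    (l.set i a).getD j d = l.getD j d := by
  simp [List.getD, List.getElem?_set_ne h]

theorem innerA_eq (r : List Int) (inat : Nat) (m : Nat) :
    ∀ (fv fh : List Int) (l1 : Int), inat < fv.length →
    (PySem.List.pyRange 0 (m : Int) 1).foldl (fun (st : List Int × List Int × Int) j =>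
      if PySem.List.pyGetD r j 0 = 1 then
        (PySem.List.pySetD st.1 (inat : Int) (PySem.List.pyGetD st.1 (inat : Int) 0 + 1),
         PySem.List.pySetD st.2.1 j (PySem.List.pyGetD st.2.1 j 0 + 1),
         st.2.2 + (inat : Int) + j)
      else st) (fv, fh, l1)
    = (fv.set inat (fv.getD inat 0 + cntN r m), bumpN r fh m,
       l1 + cntN r m * (inat : Int) + sIdxN r m) := by
  induction m with
  | zero =>
    intro fv fh l1 hi
    have h0 : fv.set inat (fv.getD inat 0) = fv := by
      rw [List.getD_eq_getElem fv 0 hi]; exact List.set_getElem_self hi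
    rw [Nat.cast_zero, PySem.List.pyRange_one_eq_nil le_rfl]
    simp only [cntN, sIdxN, bumpN, List.foldl_nil, add_zero, zero_mul, h0]
  | succ m ih =>
    intro fv fh l1 hi
    have hcast : ((m + 1 : Nat) : Int) = (m : Int) + 1 := by push_cast; ring
    rw [hcast, PySem.List.pyRange_one_succ_right (by positivity), List.foldl_append, ih fv fh l1 hi]
    simp only [List.foldl_cons, List.foldl_nil]
    by_cases hhit : r.getD m 0 = 1
    · simp only [PySem.List.pyGetD_natCast, hhit, cntN, sIdxN, bumpN, if_true,
        PySem.List.pySetD_natCast, List.set_set, getD_set_self' fv inat _ 0 hi,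
        Prod.mk.injEq]
      refine ⟨by rw [add_assoc], by trivial, by ring⟩
    · simp only [PySem.List.pyGetD_natCast, hhit, cntN, sIdxN, bumpN, if_false, add_zero]

theorem bumpN_length (r fh : List Int) (m : Nat) : (bumpN r fh m).length = fh.length := by
  induction m with
  | zero => rfl
  | succ m ih =>
    simp only [bumpN]
    split_ifs with h
    · simp [ih]
    · exact ih

theorem bumpN_getD (r fh : List Int) (m j : Nat) (hj : j < fh.length) :
    (bumpN r fh m).getD j 0 = fh.getD j 0 + (if j < m ∧ r.getD j 0 = 1 then 1 else 0) := by
  induction m with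
  | zero => simp [bumpN]
  | succ m ih =>
    by_cases hhit : r.getD m 0 = 1
    · rw [bumpN, if_pos hhit, PySem.List.pySetD_natCast, PySem.List.pyGetD_natCast]
      by_cases hjm : j = m
      · subst hjm
        rw [getD_set_self' _ _ _ _ (by rw [bumpN_length]; exact hj), ih,
            if_neg (by omega : ¬(j < j ∧ r.getD j 0 = 1)),
            if_pos (⟨by omega, hhit⟩ : j < j + 1 ∧ r.getD j 0 = 1)]
        ring
      · rw [getD_set_ne' _ _ _ _ _ (fun h => hjm h.symm), ih]
        congr 1
        by_cases hx : r.getD j 0 = 1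
        · simp only [hx, and_true]
          split_ifs <;> omega
        · rw [if_neg (fun h => hx h.2), if_neg (fun h => hx h.2)]
    · rw [bumpN, if_neg hhit, ih]
      congr 1
      by_cases hx : r.getD j 0 = 1
      · have hne : j ≠ m := fun he => hhit (he ▸ hx)
        simp only [hx, and_true]
        split_ifs <;> omega
      · rw [if_neg (fun h => hx h.2), if_neg (fun h => hx h.2)]

theorem fhK_length (grid : List (List Int)) (fh : List Int) (m k : Nat) :
    (fhK grid fh m k).length = fh.length := by
  induction k with
  | zero => rfl
  | succ k ih => simp [fhK, bumpN_length, ih]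

theorem fhK_getD (grid : List (List Int)) (fh : List Int) (m k j : Nat)
    (hjm : j < m) (hjf : j < fh.length) :
    (fhK grid fh m k).getD j 0 = fh.getD j 0 + colCntK grid j k := by
  induction k with
  | zero => simp [fhK, colCntK]
  | succ k ih =>
    simp only [fhK, colCntK]
    rw [bumpN_getD _ _ _ _ (by rw [fhK_length]; exact hjf), ih]
    have : (j < m ∧ (grid.getD k []).getD j 0 = 1) ↔ ((grid.getD k []).getD j 0 = 1) := by
      constructor
      · exact fun h => h.2
      · exact fun h => ⟨hjm, h⟩
    rw [if_congr this rfl rfl]; ring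

theorem outer_eq (grid : List (List Int)) (fh : List Int) (m : Nat) :
    ∀ (k : Nat), k ≤ grid.length →
    (PySem.List.pyRange 0 (k : Int) 1).foldl (fun st i =>
      (PySem.List.pyRange 0 (m : Int) 1).foldl (fun (st : List Int × List Int × Int) j =>
        if PySem.List.pyGetD (PySem.List.pyGetD grid i []) j 0 = 1 then
          (PySem.List.pySetD st.1 i (PySem.List.pyGetD st.1 i 0 + 1),
           PySem.List.pySetD st.2.1 j (PySem.List.pyGetD st.2.1 j 0 + 1),
           st.2.2 + i + j)
        else st) st)
      (List.replicate grid.length (0 : Int), fh, 0)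
    = (fvA grid m k ++ List.replicate (grid.length - k) 0, fhK grid fh m k, l1A grid m k) := by
  intro k
  induction k with
  | zero =>
    intro _
    rw [Nat.cast_zero, PySem.List.pyRange_one_eq_nil le_rfl]
    simp [fvA, fhK, l1A]
  | succ k ih =>
    intro hk
    have hcast : ((k + 1 : Nat) : Int) = (k : Int) + 1 := by push_cast; ring
    rw [hcast, PySem.List.pyRange_one_succ_right (by positivity), List.foldl_append,
      ih (by omega)]
    simp only [List.foldl_cons, List.foldl_nil]
    have hr : PySem.List.pyGetD grid ((k : Nat) : Int) [] = grid.getD k [] := by simp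
    rw [hr, innerA_eq (grid.getD k []) k m _ _ _ (by simp [fvA]; omega)]
    have hlen : (fvA grid m k).length = k := by simp [fvA]
    have hnk : grid.length - k = (grid.length - (k + 1)) + 1 := by omega
    have hgd : (fvA grid m k ++ List.replicate (grid.length - k) 0).getD k 0 = 0 := by
      rw [List.getD_append_right _ _ _ _ (by omega)]
      rw [hlen, Nat.sub_self, hnk, List.replicate_succ, List.getD_cons_zero]
    have hset : (fvA grid m k ++ List.replicate (grid.length - k) 0).set k
        (cntN (grid.getD k []) m)
        = fvA grid m (k + 1) ++ List.replicate (grid.length - (k + 1)) 0 := by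
      rw [List.set_append, if_neg (by omega), hlen, Nat.sub_self, hnk,
        List.replicate_succ, List.set_cons_zero]
      simp [fvA, List.range_succ]
    rw [hgd, zero_add, hset]
    rfl

theorem calcFreq_eq (grid : List (List Int)) :
    calcFreq grid = (fvA grid (PySem.List.pyGetD grid 0 []).length grid.length,
      fhK grid (List.replicate (PySem.List.pyGetD grid 0 []).length 0)
        (PySem.List.pyGetD grid 0 []).length grid.length,
      l1A grid (PySem.List.pyGetD grid 0 []).length grid.length) := by
  unfold calcFreq
  simp only [PySem.List.pyRepeat_singleton, Int.toNat_natCast]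
  rw [outer_eq grid (List.replicate (PySem.List.pyGetD grid 0 []).length 0)
    (PySem.List.pyGetD grid 0 []).length grid.length le_rfl]
  simp

theorem cntN_count (r : List Int) (m : Nat) : cntN r m = ((r.take m).count 1 : Int) := by
  induction m with
  | zero => simp [cntN]
  | succ m ih =>
    rw [List.take_add_one]
    rcases Nat.lt_or_ge m r.length with h | h
    · rw [List.getElem?_eq_getElem h]
      simp only [cntN, ih, Option.toList_some, List.count_append, List.count_singleton]
      rw [List.getD_eq_getElem r 0 h]
      push_cast
      by_cases hx : r[m] = 1 <;> simp [hx]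
    · rw [List.getElem?_eq_none h]
      simp only [cntN, ih, Option.toList_none, List.append_nil]
      rw [List.getD_eq_default _ _ h]
      norm_num

theorem range_map_getD {α β : Type} (l : List α) (f : α → β) (d : α) :
    (List.range l.length).map (fun i => f (l.getD i d)) = l.map f := by
  apply List.ext_getElem
  · simp
  · intro i h1 h2
    simp only [List.getElem_map, List.getElem_range]
    rw [List.getD_eq_getElem l d (by simpa using h2)]

theorem colCntK_stable (grid : List (List Int)) (r : List Int) (j : Nat) :
    ∀ k ≤ grid.length, colCntK (grid ++ [r]) j k = colCntK grid j k := by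
  intro k
  induction k with
  | zero => intro _; rfl
  | succ k ih =>
    intro hk
    simp only [colCntK, ih (by omega)]
    rw [List.getD_append _ _ _ _ (by omega)]

theorem colCntK_count (grid : List (List Int)) (j : Nat) :
    colCntK grid j grid.length = ((grid.map (fun row => row.getD j 0)).count 1 : Int) := by
  induction grid using List.reverseRecOn with
  | nil => rfl
  | append_singleton grid r ih =>
    rw [List.length_append, List.length_singleton]
    simp only [colCntK, colCntK_stable grid r j grid.length le_rfl, ih,
      List.map_append, List.count_append]
    rw [List.getD_append_right _ _ _ _ le_rfl]
    simp only [Nat.sub_self, List.getD_cons_zero, List.map_cons, List.map_nil,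
      List.count_singleton]
    push_cast
    split_ifs <;> simp_all

theorem colWeight_rowSIdx (grid : List (List Int)) :
    ∀ (k m : Nat), colWeight grid k m = rowSIdx grid m k := by
  intro k
  induction k with
  | zero =>
    intro m
    induction m with
    | zero => rfl
    | succ m ihm => simp only [colWeight, colCntK, rowSIdx, ihm]; ring
  | succ k ih =>
    intro m
    have step : ∀ mm : Nat, colWeight grid (k + 1) mm
        = colWeight grid k mm + sIdxN (grid.getD k []) mm := by
      intro mm
      induction mm with
      | zero => simp [colWeight, sIdxN]
      | succ mm ihm =>
        simp only [colWeight, colCntK, sIdxN, ihm]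
        split_ifs <;> ring
    rw [step m, ih m, rowSIdx]

theorem wSum_stable (xs : List Int) (x : Int) :
    ∀ k ≤ xs.length, wSum (xs ++ [x]) k = wSum xs k := by
  intro k
  induction k with
  | zero => intro _; rfl
  | succ k ih =>
    intro hk
    simp only [wSum, ih (by omega)]
    rw [List.getD_append _ _ _ _ (by omega)]

theorem enum_weight (xs : List Int) :
    ((PySem.List.enumerate xs 0).map (fun p => p.1 * p.2)).sum = wSum xs xs.length := by
  induction xs using List.reverseRecOn with
  | nil => rfl
  | append_singleton xs x ih =>
    rw [PySem.List.enumerate_append, List.map_append, List.sum_append, ih,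
      List.length_append, List.length_singleton]
    simp only [wSum, wSum_stable xs x xs.length le_rfl]
    rw [List.getD_append_right _ _ _ _ le_rfl]
    simp [PySem.List.enumerate_cons, PySem.List.enumerate_nil]

theorem wSum_fvA (grid : List (List Int)) (m : Nat) :
    ∀ k ≤ grid.length, wSum (fvA grid m grid.length) k = rowCntW grid m k := by
  intro k
  induction k with
  | zero => intro _; rfl
  | succ k ih =>
    intro hk
    simp only [wSum, rowCntW, ih (by omega)]
    have hget : (fvA grid m grid.length).getD k 0 = cntN (grid.getD k []) m := by
      rw [List.getD_eq_getElem _ _ (by simp [fvA]; omega)]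
      simp [fvA]
    rw [hget]; ring

theorem wSum_fhK (grid : List (List Int)) (m : Nat)
    (hget : ∀ j < m, (fhK grid (List.replicate m 0) m grid.length).getD j 0 = colCntK grid j grid.length) :
    ∀ k ≤ m, wSum (fhK grid (List.replicate m 0) m grid.length) k = colWeight grid grid.length k := by
  intro k
  induction k with
  | zero => intro _; rfl
  | succ k ih =>
    intro hk
    simp only [wSum, colWeight, ih (by omega)]
    rw [hget k (by omega)]

theorem l1A_split (grid : List (List Int)) (m : Nat) :
    ∀ k, l1A grid m k = rowCntW grid m k + rowSIdx grid m k := by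
  intro k
  induction k with
  | zero => rfl
  | succ k ih => simp only [l1A, rowCntW, rowSIdx, ih]; ring

theorem fhK_eq_map (grid : List (List Int)) (m : Nat) :
    fhK grid (List.replicate m 0) m grid.length
    = (PySem.List.pyRange 0 (m : Int) 1).map (fun j =>
        (PySem.List.count (grid.map (fun row => PySem.List.pyGetD row j 0)) 1 : Int)) := by
  apply List.ext_getElem
  · rw [fhK_length]
    simp [PySem.List.length_pyRange_one]
  · intro j h1 h2
    have hj : j < m := by rw [fhK_length, List.length_replicate] at h1; exact h1
    rw [← List.getD_eq_getElem _ 0 h1,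
      fhK_getD grid _ m grid.length j hj (by simp [hj])]
    simp only [List.getElem_map, PySem.List.getElem_pyRange_one, zero_add,
      PySem.List.pyGetD_natCast, PySem.List.count_eq]
    rw [colCntK_count]
    simp

theorem fvA_eq_map (grid : List (List Int)) (m : Nat) :
    fvA grid m grid.length
    = grid.map (fun row => (PySem.List.count (PySem.List.slice row none (some (m : Int))) 1 : Int)) := by
  have : ∀ row : List Int,
      (PySem.List.count (PySem.List.slice row none (some (m : Int))) 1 : Int) = cntN row m := by
    intro row
    rw [PySem.List.count_eq, PySem.List.slice_to_natCast, cntN_count]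
  rw [List.map_congr_left (fun row _ => this row)]
  exact range_map_getD grid (fun r => cntN r m) []

-- ===== VERDICT (by name: the statement is the Claim_ definition above) =====
theorem calcFreq_spec : Claim_equal_calcFreq := by
  intro grid _ _
  show calcFreq grid = calcFreq_alt grid
  rw [calcFreq_eq]
  unfold calcFreq_alt
  simp only []
  set m := (PySem.List.pyGetD grid 0 []).length with hm
  have hget : ∀ j < m, (fhK grid (List.replicate m 0) m grid.length).getD j 0
      = colCntK grid j grid.length := by
    intro j hj
    rw [fhK_getD grid _ m grid.length j hj (by simp [hj])]
    simp
  have hfv := fvA_eq_map grid m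
  have hfh := fhK_eq_map grid m
  refine Prod.ext ?_ (Prod.ext ?_ ?_)
  · exact hfv
  · exact hfh
  · show l1A grid m grid.length = _
    rw [← hfv, ← hfh, enum_weight, enum_weight, l1A_split grid m grid.length]
    have h1 : (fvA grid m grid.length).length = grid.length := by simp [fvA]
    have h2 : (fhK grid (List.replicate m 0) m grid.length).length = m := by
      rw [fhK_length, List.length_replicate]
    rw [h1, h2, wSum_fvA grid m grid.length le_rfl, wSum_fhK grid m hget m le_rfl,
      colWeight_rowSIdx grid grid.length m]
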